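-- pv_equiv track=rewrite | github.com/TitouanBertaux/Puissance-4 | dessin.py | gravite
-- ===== SOURCE A (Python) =====
-- def gravite(lst):
--     rows = len(lst)
--     cols = len(lst[0])
--
--     for j in range(cols):
--         # Traverse each column from bottom to top
--         for i in range(rows - 2, -1, -1):
--             if lst[i][j] != 0:
--                 # Find the next available position in the column
--                 k = i + 1
--                 while k < rows and lst[k][j] == 0:
--                     lst[k][j] = lst[k - 1][j]
--                     lst[k - 1][j] = 0
--                     k += 1
--
--     return lst
-- ===== SOURCE B (Python) =====
-- # B: per-column stable compaction -- collect the column's non-zeros in one pass,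
-- # then rewrite the column as zeros followed by the non-zeros (in place, like A).
-- def gravite(lst):
--     rows = len(lst)
--     cols = len(lst[0])
--     for j in range(cols):
--         nz = [lst[i][j] for i in range(rows) if lst[i][j] != 0]
--         z = rows - len(nz)
--         for i in range(rows):
--             lst[i][j] = 0 if i < z else nz[i - z]
--     return lst
-- ===== Notes on version B (the rewrite author's own statement) =====
-- stated objective: alternative
-- what changed: A repeatedly bubbles each non-zero cell down through zeros (nested i/while scans per column); B makes one pass per column collecting its non-zeros and then rewrites the column as zeros followed by those non-zeros.
-- outside the precondition, e.g. on gravite([[0], []]): A returns [[0], []], B raises IndexError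
import Mathlib
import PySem

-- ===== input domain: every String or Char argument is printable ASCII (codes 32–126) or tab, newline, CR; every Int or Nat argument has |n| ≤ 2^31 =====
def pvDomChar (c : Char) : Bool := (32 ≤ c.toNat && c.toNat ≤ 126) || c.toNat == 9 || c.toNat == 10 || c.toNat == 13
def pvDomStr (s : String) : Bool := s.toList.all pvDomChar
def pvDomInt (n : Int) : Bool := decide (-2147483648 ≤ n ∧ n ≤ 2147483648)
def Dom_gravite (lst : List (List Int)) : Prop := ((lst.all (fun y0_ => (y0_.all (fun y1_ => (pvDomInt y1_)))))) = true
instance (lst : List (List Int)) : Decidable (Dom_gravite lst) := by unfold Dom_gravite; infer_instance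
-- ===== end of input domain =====

-- B replaces A's per-cell bubbling with one pass per column that collects the non-zeros and
-- rewrites the column (zeros on top); like A, B mutates lst in place and returns it.


-- ===== PORT A =====
-- lst[i][j] read / write; all indices are in range on Pre_ inputs, so getD/set are exact there
def pvGetAt (lst : List (List Int)) (i j : Nat) : Int := (lst.getD i []).getD j 0
def pvSetAt (lst : List (List Int)) (i j : Nat) (v : Int) : List (List Int) :=
  lst.set i ((lst.getD i []).set j v)

-- the inner `while k < rows and lst[k][j] == 0` loop
def pvWhileA (rows j k : Nat) (lst : List (List Int)) : List (List Int) :=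
  if h : k < rows ∧ pvGetAt lst k j = 0 then
    pvWhileA rows j (k + 1) (pvSetAt (pvSetAt lst k j (pvGetAt lst (k - 1) j)) (k - 1) j 0)
  else lst
termination_by rows - k
decreasing_by omega

-- `for i in range(rows-2, -1, -1)` = indices rows-2 .. 0, i.e. (List.range (rows-1)).reverse
def pvILoopA (rows j : Nat) (lst : List (List Int)) : List (List Int) :=
  ((List.range (rows - 1)).reverse).foldl
    (fun l i => if pvGetAt l i j ≠ 0 then pvWhileA rows j (i + 1) l else l) lst

def gravite (lst : List (List Int)) : List (List Int) :=
  let rows := lst.length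
  let cols := (lst.headD []).length   -- len(lst[0]); Pre_ gives lst ≠ []
  (List.range cols).foldl (fun l j => pvILoopA rows j l) lst

-- ===== PORT B =====
def gravite_alt (lst : List (List Int)) : List (List Int) :=
  let rows := lst.length
  let cols := (lst.headD []).length   -- len(lst[0]); Pre_ gives lst ≠ []
  (List.range cols).foldl (fun l j =>
    let nz := ((List.range rows).map (fun i => (l.getD i []).getD j 0)).filter (fun x => x ≠ 0)
    let z := rows - nz.length
    (List.range rows).foldl
      (fun l2 i => pvSetAt l2 i j (if i < z then 0 else nz.getD (i - z) 0)) l) lst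

-- ===== PRECONDITION & SPEC =====
-- Pre_ excludes the empty list (A raises IndexError on len(lst[0])) and grids with a row
-- shorter than the first row: there B always raises IndexError, while A raises on most of
-- them but returns the grid untouched when the data never makes it read the missing cells.
def Pre_gravite (lst : List (List Int)) : Prop :=
  lst ≠ [] ∧ ∀ r ∈ lst, (lst.headD []).length ≤ r.length
instance (lst : List (List Int)) : Decidable (Pre_gravite lst) := by
  unfold Pre_gravite; infer_instance

def pvWitness_gravite : List (List Int) := [[1, 0], [0, 2], [0, 0]]

def Spec_gravite (lst : List (List Int)) (out : List (List Int)) : Prop := out = gravite_alt lst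
instance (lst : List (List Int)) (out : List (List Int)) : Decidable (Spec_gravite lst out) := by
  unfold Spec_gravite; infer_instance

-- ===== CLAIM (what is proved, stated in full; the proofs are below) =====
def Claim_equal_gravite : Prop :=
  ∀ (lst : List (List Int)), Dom_gravite lst → Pre_gravite lst → Spec_gravite lst (gravite lst)

-- ===== LEMMAS AND PROOFS =====

-- 1-D model of the inner while loop, acting on a single column
def wh1 (n k : Nat) (c : List Int) : List Int :=
  if h : k < n ∧ c.getD k 0 = 0 then
    wh1 n (k + 1) ((c.set k (c.getD (k - 1) 0)).set (k - 1) 0)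
  else c
termination_by n - k
decreasing_by omega

-- 1-D model of the i-loop
def il1 (n : Nat) (is : List Nat) (c : List Int) : List Int :=
  is.foldl (fun c i => if c.getD i 0 ≠ 0 then wh1 n (i + 1) c else c) c

-- stable compaction of a column: zeros on top, non-zeros at the bottom in order
def cmp1 (t : List Int) : List Int :=
  List.replicate (t.length - (t.filter (fun x => x ≠ 0)).length) 0 ++ t.filter (fun x => x ≠ 0)

-- column j of a grid
def colOf (j : Nat) (lst : List (List Int)) : List Int := lst.map (fun r => r.getD j 0)

-- 1-D version of the column action of the whole i-loop
def A1 (rows : Nat) (c : List Int) : List Int := il1 rows ((List.range (rows - 1)).reverse) c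

theorem getD_mid (p l : List Int) (v : Int) : (p ++ v :: l).getD p.length 0 = v := by
  rw [List.getD_eq_getElem?_getD, List.getElem?_append_right (le_refl _)]
  simp

theorem getD_mid1 (p l : List Int) (v : Int) :
    (p ++ v :: l).getD (p.length + 1) 0 = l.getD 0 0 := by
  rw [List.getD_eq_getElem?_getD, List.getElem?_append_right (by omega)]
  simp [List.getD_eq_getElem?_getD]

theorem set_mid (p l : List Int) (v x : Int) : (p ++ v :: l).set p.length x = p ++ x :: l := by
  rw [List.set_append_right _ _ (le_refl _)]
  simp

theorem set_mid1 (p l : List Int) (v w x : Int) :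
    (p ++ v :: w :: l).set (p.length + 1) x = p ++ v :: x :: l := by
  rw [List.set_append_right _ _ (by omega)]
  have h : p.length + 1 - p.length = 1 := by omega
  rw [h]
  simp

theorem wh1_spec : ∀ (z : Nat) (n : Nat) (p rest : List Int) (v : Int),
    n = p.length + 1 + z + rest.length → (rest = [] ∨ rest.getD 0 0 ≠ 0) →
    wh1 n (p.length + 1) (p ++ v :: (List.replicate z 0 ++ rest))
      = p ++ (List.replicate z 0 ++ v :: rest) := by
  intro z
  induction z with
  | zero =>
    intro n p rest v hn h
    simp only [List.replicate_zero, List.nil_append]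
    have hneg : ¬ (p.length + 1 < n ∧ (p ++ v :: rest).getD (p.length + 1) 0 = 0) := by
      rcases h with h | h
      · subst h
        simp only [List.length_nil] at hn
        rintro ⟨h1, -⟩
        omega
      · rintro ⟨-, h2⟩
        rw [getD_mid1] at h2
        exact h h2
    rw [wh1, dif_neg hneg]
  | succ z ih =>
    intro n p rest v hn h
    simp only [List.replicate_succ, List.cons_append]
    have hpos : p.length + 1 < n ∧
        (p ++ v :: 0 :: (List.replicate z 0 ++ rest)).getD (p.length + 1) 0 = 0 := by
      refine ⟨by omega, ?_⟩
      rw [getD_mid1 p (0 :: (List.replicate z 0 ++ rest)) v]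
      rfl
    rw [wh1, dif_pos hpos]
    have h1 : p.length + 1 - 1 = p.length := by omega
    rw [h1, getD_mid p (0 :: (List.replicate z 0 ++ rest)) v,
      set_mid1 p (List.replicate z 0 ++ rest) v 0 v,
      set_mid p (v :: (List.replicate z 0 ++ rest)) v 0]
    have e1 : p ++ (0 : Int) :: v :: (List.replicate z 0 ++ rest)
        = (p ++ [0]) ++ v :: (List.replicate z 0 ++ rest) := by simp
    have e2 : p.length + 1 + 1 = (p ++ [(0 : Int)]).length + 1 := by simp
    have hn2 : n = (p ++ [(0 : Int)]).length + 1 + z + rest.length := by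
      simp only [List.length_append, List.length_cons, List.length_nil]
      omega
    rw [e1, e2, ih n (p ++ [0]) rest v hn2 h]
    simp

theorem cmp1_cons_zero (t : List Int) : cmp1 ((0 : Int) :: t) = 0 :: cmp1 t := by
  unfold cmp1
  have hf : (((0 : Int) :: t).filter (fun x => x ≠ 0)) = t.filter (fun x => x ≠ 0) := by
    simp
  rw [hf]
  have hle := List.length_filter_le (fun x => decide (x ≠ 0)) t
  have h1 : ((0 : Int) :: t).length - (t.filter (fun x => x ≠ 0)).length
      = (t.length - (t.filter (fun x => x ≠ 0)).length) + 1 := by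
    simp only [List.length_cons]
    omega
  rw [h1, List.replicate_succ]
  simp

theorem cmp1_cons_nonzero (t : List Int) (v : Int) (hv : v ≠ 0) :
    cmp1 (v :: t)
      = List.replicate (t.length - (t.filter (fun x => x ≠ 0)).length) 0
        ++ v :: t.filter (fun x => x ≠ 0) := by
  unfold cmp1
  have hf : ((v :: t).filter (fun x => x ≠ 0)) = v :: t.filter (fun x => x ≠ 0) := by
    simp [hv]
  rw [hf]
  have hle := List.length_filter_le (fun x => decide (x ≠ 0)) t
  have h1 : (v :: t).length - (v :: t.filter (fun x => x ≠ 0)).length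
      = t.length - (t.filter (fun x => x ≠ 0)).length := by
    simp only [List.length_cons]
    omega
  rw [h1]

theorem filter_head_nonzero (t : List Int) :
    t.filter (fun x => x ≠ 0) = [] ∨ (t.filter (fun x => x ≠ 0)).getD 0 0 ≠ 0 := by
  cases hf : t.filter (fun x => x ≠ 0) with
  | nil => exact Or.inl rfl
  | cons a l =>
    right
    have ha : a ∈ t.filter (fun x => x ≠ 0) := by rw [hf]; exact List.mem_cons_self
    have := (List.mem_filter.mp ha).2
    simpa using this

theorem il1_spec (n : Nat) : ∀ (p : List Int), ∀ (t : List Int), n = p.length + t.length →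
    il1 n ((List.range p.length).reverse) (p ++ cmp1 t) = cmp1 (p ++ t) := by
  intro p
  induction p using List.reverseRecOn with
  | nil =>
    intro t _
    simp [il1]
  | append_singleton q v ih =>
    intro t hn
    have hn' : n = q.length + 1 + t.length := by
      simp only [List.length_append, List.length_cons, List.length_nil] at hn
      omega
    have hlen : (q ++ [v]).length = q.length + 1 := by simp
    have hr : ((List.range (q ++ [v]).length).reverse)
        = q.length :: (List.range q.length).reverse := by
      rw [hlen, List.range_succ]
      simp
    have hc : (q ++ [v]) ++ cmp1 t = q ++ v :: cmp1 t := by simp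
    rw [hr, hc]
    have hget : (q ++ v :: cmp1 t).getD q.length 0 = v := getD_mid _ _ _
    show il1 n ((List.range q.length).reverse)
        (if (q ++ v :: cmp1 t).getD q.length 0 ≠ 0 then wh1 n (q.length + 1) (q ++ v :: cmp1 t)
         else (q ++ v :: cmp1 t)) = cmp1 ((q ++ [v]) ++ t)
    rw [hget]
    have hassoc : (q ++ [v]) ++ t = q ++ v :: t := by simp
    rw [hassoc]
    have hle := List.length_filter_le (fun x => decide (x ≠ 0)) t
    by_cases hv : v = 0
    · subst hv
      rw [if_neg (by simp)]
      have heq : (q ++ (0 : Int) :: cmp1 t) = q ++ cmp1 (0 :: t) := by rw [cmp1_cons_zero]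
      rw [heq]
      exact ih (0 :: t) (by simp only [List.length_cons]; omega)
    · rw [if_pos hv]
      have hcmp : cmp1 t = List.replicate (t.length - (t.filter (fun x => x ≠ 0)).length) 0
          ++ t.filter (fun x => x ≠ 0) := rfl
      rw [hcmp]
      rw [wh1_spec (t.length - (t.filter (fun x => x ≠ 0)).length) n q
            (t.filter (fun x => x ≠ 0)) v (by omega) (filter_head_nonzero t)]
      have heq : q ++ (List.replicate (t.length - (t.filter (fun x => x ≠ 0)).length) 0
          ++ v :: t.filter (fun x => x ≠ 0)) = q ++ cmp1 (v :: t) := by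
        rw [cmp1_cons_nonzero t v hv]
      rw [heq]
      exact ih (v :: t) (by simp only [List.length_cons]; omega)

-- ===== 2-D lifting =====

theorem grid_get_col (lst : List (List Int)) (i j : Nat) :
    pvGetAt lst i j = (colOf j lst).getD i 0 := by
  induction lst generalizing i with
  | nil => simp [pvGetAt, colOf]
  | cons r rs ih =>
    cases i with
    | zero => simp [pvGetAt, colOf]
    | succ i => simpa [pvGetAt, colOf] using ih i

theorem rowlen_eq (lst : List (List Int)) (i : Nat) :
    (lst.getD i []).length = (lst.map List.length).getD i 0 := by
  induction lst generalizing i with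
  | nil => simp
  | cons r rs ih =>
    cases i with
    | zero => simp
    | succ i => simpa using ih i

theorem colOf_setAt (j' j : Nat) (v : Int) :
    ∀ (lst : List (List Int)) (i : Nat), j < (lst.getD i []).length →
    colOf j' (pvSetAt lst i j v)
      = if j' = j then (colOf j' lst).set i v else colOf j' lst := by
  intro lst
  induction lst with
  | nil => intro i h; simp at h
  | cons r rs ih =>
    intro i h
    cases i with
    | zero =>
      simp only [List.getD_cons_zero] at h
      have hset : pvSetAt (r :: rs) 0 j v = (r.set j v) :: rs := by simp [pvSetAt]
      rw [hset]
      by_cases hj : j' = j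
      · subst hj
        rw [if_pos rfl]
        simp only [colOf, List.map_cons, List.set_cons_zero]
        congr 1
        rw [List.getD_eq_getElem?_getD, List.getElem?_set_self h]
        rfl
      · rw [if_neg hj]
        simp only [colOf, List.map_cons]
        congr 1
        rw [List.getD_eq_getElem?_getD, List.getElem?_set_ne (fun he => hj he.symm),
          ← List.getD_eq_getElem?_getD]
    | succ i =>
      simp only [List.getD_cons_succ] at h
      have hset : pvSetAt (r :: rs) (i + 1) j v = r :: pvSetAt rs i j v := by
        simp [pvSetAt, List.set_cons_succ]
      rw [hset]
      have hih := ih i h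
      by_cases hj : j' = j
      · subst hj
        rw [if_pos rfl]
        rw [if_pos rfl] at hih
        simp only [colOf, List.map_cons] at hih ⊢
        rw [List.set_cons_succ, hih]
      · rw [if_neg hj]
        rw [if_neg hj] at hih
        simp only [colOf, List.map_cons] at hih ⊢
        rw [hih]

theorem rowlens_setAt (j : Nat) (v : Int) :
    ∀ (lst : List (List Int)) (i : Nat),
    (pvSetAt lst i j v).map List.length = lst.map List.length := by
  intro lst
  induction lst with
  | nil => intro i; simp [pvSetAt]
  | cons r rs ih =>
    intro i
    cases i with
    | zero => simp [pvSetAt]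
    | succ i =>
      have hset : pvSetAt (r :: rs) (i + 1) j v = r :: pvSetAt rs i j v := by
        simp [pvSetAt, List.set_cons_succ]
      rw [hset]
      simp [ih i]

theorem length_eq_of_rowlens {l1 l2 : List (List Int)}
    (h : l1.map List.length = l2.map List.length) : l1.length = l2.length := by
  have := congrArg List.length h
  simpa using this

theorem whileA_lift (rows j : Nat) : ∀ (m k : Nat) (lst : List (List Int)),
    rows - k ≤ m → lst.length = rows →
    (∀ i, i < rows → j < (lst.map List.length).getD i 0) →
    (pvWhileA rows j k lst).map List.length = lst.map List.length ∧
    colOf j (pvWhileA rows j k lst) = wh1 rows k (colOf j lst) ∧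
    (∀ j', j' ≠ j → colOf j' (pvWhileA rows j k lst) = colOf j' lst) := by
  intro m
  induction m with
  | zero =>
    intro k lst hm hlen hw
    have hk : ¬ k < rows := by omega
    rw [pvWhileA, dif_neg (by rintro ⟨h1, -⟩; exact hk h1),
      wh1, dif_neg (by rintro ⟨h1, -⟩; exact hk h1)]
    exact ⟨rfl, rfl, fun _ _ => rfl⟩
  | succ m ih =>
    intro k lst hm hlen hw
    rw [pvWhileA, wh1]
    rw [grid_get_col]
    by_cases hc : k < rows ∧ (colOf j lst).getD k 0 = 0
    · rw [dif_pos hc, dif_pos hc]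
      have hkrows : k < rows := hc.1
      -- row-length facts
      have hwk : j < (lst.getD k []).length := by rw [rowlen_eq]; exact hw k hkrows
      have hrl1 : (pvSetAt lst k j (pvGetAt lst (k - 1) j)).map List.length
          = lst.map List.length := rowlens_setAt _ _ _ _
      have hwk1 : j < ((pvSetAt lst k j (pvGetAt lst (k - 1) j)).getD (k - 1) []).length := by
        rw [rowlen_eq, hrl1, ← rowlen_eq]
        rw [rowlen_eq]
        exact hw (k - 1) (by omega)
      set lst1 := pvSetAt (pvSetAt lst k j (pvGetAt lst (k - 1) j)) (k - 1) j 0 with hlst1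
      have hrl : lst1.map List.length = lst.map List.length := by
        rw [hlst1, rowlens_setAt, rowlens_setAt]
      have hcol : colOf j lst1
          = ((colOf j lst).set k ((colOf j lst).getD (k - 1) 0)).set (k - 1) 0 := by
        rw [hlst1, colOf_setAt j j 0 _ _ hwk1, if_pos rfl,
          colOf_setAt j j _ _ _ hwk, if_pos rfl, grid_get_col]
      have hcol' : ∀ j', j' ≠ j → colOf j' lst1 = colOf j' lst := by
        intro j' hj'
        rw [hlst1, colOf_setAt j' j 0 _ _ hwk1, if_neg hj',
          colOf_setAt j' j _ _ _ hwk, if_neg hj']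
      have hlen1 : lst1.length = rows := by
        rw [length_eq_of_rowlens hrl]; exact hlen
      have hw1 : ∀ i, i < rows → j < (lst1.map List.length).getD i 0 := by
        intro i hi; rw [hrl]; exact hw i hi
      obtain ⟨ha, hb, hc'⟩ := ih (k + 1) lst1 (by omega) hlen1 hw1
      refine ⟨by rw [ha, hrl], ?_, ?_⟩
      · rw [hb, hcol]
      · intro j' hj'
        rw [hc' j' hj', hcol' j' hj']
    · rw [dif_neg hc, dif_neg hc]
      exact ⟨rfl, rfl, fun _ _ => rfl⟩

theorem iloop_lift (rows j : Nat) : ∀ (is : List Nat) (lst : List (List Int)),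
    lst.length = rows →
    (∀ i, i < rows → j < (lst.map List.length).getD i 0) →
    ((is.foldl (fun l i => if pvGetAt l i j ≠ 0 then pvWhileA rows j (i + 1) l else l) lst).map
        List.length = lst.map List.length) ∧
    colOf j (is.foldl (fun l i => if pvGetAt l i j ≠ 0 then pvWhileA rows j (i + 1) l else l) lst)
      = il1 rows is (colOf j lst) ∧
    (∀ j', j' ≠ j →
      colOf j' (is.foldl (fun l i => if pvGetAt l i j ≠ 0 then pvWhileA rows j (i + 1) l else l) lst)
        = colOf j' lst) := by
  intro is
  induction is with
  | nil => intro lst hlen hw; exact ⟨rfl, rfl, fun _ _ => rfl⟩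
  | cons i is ih =>
    intro lst hlen hw
    simp only [List.foldl_cons]
    rw [grid_get_col]
    have hstep : il1 rows (i :: is) (colOf j lst)
        = il1 rows is (if (colOf j lst).getD i 0 ≠ 0 then wh1 rows (i + 1) (colOf j lst)
            else colOf j lst) := rfl
    rw [hstep]
    by_cases hc : (colOf j lst).getD i 0 ≠ 0
    · rw [if_pos hc, if_pos hc]
      obtain ⟨ha, hb, hc'⟩ := whileA_lift rows j (rows - (i + 1)) (i + 1) lst (le_refl _) hlen hw
      have hlen1 : (pvWhileA rows j (i + 1) lst).length = rows := by
        rw [length_eq_of_rowlens ha]; exact hlen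
      have hw1 : ∀ i', i' < rows → j < ((pvWhileA rows j (i + 1) lst).map List.length).getD i' 0 := by
        intro i' hi'; rw [ha]; exact hw i' hi'
      obtain ⟨ha2, hb2, hc2⟩ := ih (pvWhileA rows j (i + 1) lst) hlen1 hw1
      refine ⟨by rw [ha2, ha], by rw [hb2, hb], ?_⟩
      intro j' hj'
      rw [hc2 j' hj', hc' j' hj']
    · rw [if_neg hc, if_neg hc]
      exact ih lst hlen hw

theorem jloop_lift (rows : Nat) : ∀ (js : List Nat) (lst : List (List Int)),
    js.Nodup → lst.length = rows →
    (∀ i, i < rows → ∀ j ∈ js, j < (lst.map List.length).getD i 0) →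
    ((js.foldl (fun l j => pvILoopA rows j l) lst).map List.length = lst.map List.length) ∧
    (∀ j', colOf j' (js.foldl (fun l j => pvILoopA rows j l) lst)
      = if j' ∈ js then A1 rows (colOf j' lst) else colOf j' lst) := by
  intro js
  induction js with
  | nil => intro lst _ _ _; exact ⟨rfl, fun j' => by simp⟩
  | cons j js ih =>
    intro lst hnd hlen hw
    simp only [List.foldl_cons]
    have hwj : ∀ i, i < rows → j < (lst.map List.length).getD i 0 :=
      fun i hi => hw i hi j (List.mem_cons_self)
    obtain ⟨ha, hb, hc⟩ := iloop_lift rows j ((List.range (rows - 1)).reverse) lst hlen hwj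
    have hmid : pvILoopA rows j lst
        = ((List.range (rows - 1)).reverse).foldl
            (fun l i => if pvGetAt l i j ≠ 0 then pvWhileA rows j (i + 1) l else l) lst := rfl
    have hlen1 : (pvILoopA rows j lst).length = rows := by
      rw [hmid, length_eq_of_rowlens ha]; exact hlen
    have hw1 : ∀ i, i < rows → ∀ j'' ∈ js, j'' < ((pvILoopA rows j lst).map List.length).getD i 0 := by
      intro i hi j'' hj''
      rw [hmid, ha]
      exact hw i hi j'' (List.mem_cons_of_mem _ hj'')
    obtain ⟨ha2, hb2⟩ := ih (pvILoopA rows j lst) (List.Nodup.of_cons hnd) hlen1 hw1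
    constructor
    · rw [ha2, hmid, ha]
    · intro j'
      rw [hb2 j']
      by_cases hmem : j' ∈ js
      · rw [if_pos hmem, if_pos (List.mem_cons_of_mem _ hmem)]
        by_cases hjj : j' = j
        · subst hjj
          exfalso
          exact (List.nodup_cons.mp hnd).1 hmem
        · rw [hmid, hc j' hjj]
      · rw [if_neg hmem]
        by_cases hjj : j' = j
        · subst hjj
          rw [if_pos (List.mem_cons_self), hmid, hb]
          rfl
        · rw [if_neg (by simp [hjj, hmem]), hmid, hc j' hjj]

theorem wh1_stop (n : Nat) (c : List Int) : wh1 n n c = c := by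
  rw [wh1, dif_neg]
  rintro ⟨h1, -⟩
  omega

theorem A1_spec (rows : Nat) (c : List Int) (hlen : c.length = rows) (hpos : 1 ≤ rows) :
    A1 rows c = cmp1 c := by
  have hrr : rows = (rows - 1) + 1 := by omega
  have hfull : il1 rows ((List.range rows).reverse) c = cmp1 c := by
    have h2 := il1_spec rows c [] (by simp [hlen])
    rw [show cmp1 ([] : List Int) = [] from rfl, List.append_nil, hlen] at h2
    exact h2
  have hsplit : (List.range rows).reverse = (rows - 1) :: (List.range (rows - 1)).reverse := by
    rw [hrr, List.range_succ]
    simp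
  rw [hsplit] at hfull
  have hstep : il1 rows ((rows - 1) :: (List.range (rows - 1)).reverse) c
      = il1 rows ((List.range (rows - 1)).reverse)
          (if c.getD (rows - 1) 0 ≠ 0 then wh1 rows ((rows - 1) + 1) c else c) := rfl
  rw [hstep, ← hrr, wh1_stop, ite_self] at hfull
  exact hfull

theorem map_range_getD (j : Nat) (lst : List (List Int)) :
    (List.range lst.length).map (fun i => (lst.getD i []).getD j 0)
      = lst.map (fun r => r.getD j 0) := by
  apply List.ext_getElem
  · simp
  intro i h1 h2
  rw [List.getElem_map, List.getElem_map, List.getElem_range]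
  have hi : i < lst.length := by simpa using h2
  rw [List.getD_eq_getElem _ _ hi]

theorem getD_colOf (lst : List (List Int)) (i j : Nat) (h : i < lst.length) :
    (colOf j lst).getD i 0 = (lst.getD i []).getD j 0 := by
  rw [colOf, List.getD_eq_getElem _ _ (by simpa using h), List.getElem_map,
    List.getD_eq_getElem _ _ h]

theorem foldl_set_range (f : Nat → Int) : ∀ (m : Nat) (c : List Int), m ≤ c.length →
    (List.range m).foldl (fun c2 i => c2.set i (f i)) c
      = (List.range m).map f ++ c.drop m := by
  intro m
  induction m with
  | zero => intro c _; simp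
  | succ m ih =>
    intro c hm
    rw [List.range_succ, List.foldl_append, List.foldl_cons, List.foldl_nil,
      ih c (by omega)]
    rw [List.set_append_right _ _ (by simp)]
    have hml : m < c.length := by omega
    have hidx : m - ((List.range m).map f).length = 0 := by simp
    rw [hidx, List.drop_eq_getElem_cons hml, List.set_cons_zero]
    simp

theorem map_range_pad (z : Nat) (nz : List Int) (n : Nat) (h : n = z + nz.length) :
    (List.range n).map (fun i => if i < z then (0 : Int) else nz.getD (i - z) 0)
      = List.replicate z 0 ++ nz := by
  apply List.ext_getElem
  · simp [h]
  intro i h1 h2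
  have hin : i < n := by simpa using h1
  rw [List.getElem_map, List.getElem_range]
  by_cases hiz : i < z
  · rw [if_pos hiz, List.getElem_append_left (by simpa using hiz), List.getElem_replicate]
  · rw [if_neg hiz, List.getElem_append_right (by simpa using Nat.le_of_not_lt hiz)]
    simp only [List.length_replicate]
    rw [List.getD_eq_getElem _ _ (by omega : i - z < nz.length)]

theorem writecol_lift (j : Nat) (g : Nat → Int) : ∀ (is : List Nat) (lst : List (List Int)),
    (∀ i ∈ is, j < (lst.getD i []).length) →
    ((is.foldl (fun l2 i => pvSetAt l2 i j (g i)) lst).map List.length = lst.map List.length) ∧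
    colOf j (is.foldl (fun l2 i => pvSetAt l2 i j (g i)) lst)
      = is.foldl (fun c i => c.set i (g i)) (colOf j lst) ∧
    (∀ j', j' ≠ j → colOf j' (is.foldl (fun l2 i => pvSetAt l2 i j (g i)) lst) = colOf j' lst) := by
  intro is
  induction is with
  | nil => intro lst _; exact ⟨rfl, rfl, fun _ _ => rfl⟩
  | cons i is ih =>
    intro lst hin
    simp only [List.foldl_cons]
    have hji : j < (lst.getD i []).length := hin i (List.mem_cons_self)
    have hsh : (pvSetAt lst i j (g i)).map List.length = lst.map List.length :=
      rowlens_setAt _ _ _ _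
    have hin' : ∀ i' ∈ is, j < ((pvSetAt lst i j (g i)).getD i' []).length := by
      intro i' hi'
      rw [rowlen_eq, hsh, ← rowlen_eq]
      exact hin i' (List.mem_cons_of_mem _ hi')
    obtain ⟨ha, hb, hc⟩ := ih (pvSetAt lst i j (g i)) hin'
    refine ⟨by rw [ha, hsh], ?_, ?_⟩
    · rw [hb, colOf_setAt j j (g i) lst i hji, if_pos rfl]
    · intro j' hj'
      rw [hc j' hj', colOf_setAt j' j (g i) lst i hji, if_neg hj']

theorem jloopB_lift (rows : Nat) : ∀ (js : List Nat) (lst : List (List Int)),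
    js.Nodup → lst.length = rows →
    (∀ i, i < rows → ∀ j ∈ js, j < (lst.map List.length).getD i 0) →
    ((js.foldl (fun l j =>
        let nz := ((List.range rows).map (fun i => (l.getD i []).getD j 0)).filter (fun x => x ≠ 0)
        let z := rows - nz.length
        (List.range rows).foldl
          (fun l2 i => pvSetAt l2 i j (if i < z then 0 else nz.getD (i - z) 0)) l) lst).map
        List.length = lst.map List.length) ∧
    (∀ j', colOf j' (js.foldl (fun l j =>
        let nz := ((List.range rows).map (fun i => (l.getD i []).getD j 0)).filter (fun x => x ≠ 0)
        let z := rows - nz.length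
        (List.range rows).foldl
          (fun l2 i => pvSetAt l2 i j (if i < z then 0 else nz.getD (i - z) 0)) l) lst)
      = if j' ∈ js then cmp1 (colOf j' lst) else colOf j' lst) := by
  intro js
  induction js with
  | nil => intro lst _ _ _; exact ⟨rfl, fun j' => by simp⟩
  | cons j js ih =>
    intro lst hnd hlen hw
    simp only [List.foldl_cons]
    have hc : ((List.range rows).map (fun i => (lst.getD i []).getD j 0)).filter
        (fun x => x ≠ 0) = (colOf j lst).filter (fun x => x ≠ 0) := by
      rw [← hlen, map_range_getD]
      rfl
    have hin : ∀ i ∈ List.range rows, j < (lst.getD i []).length := by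
      intro i hi
      rw [rowlen_eq]
      exact hw i (List.mem_range.mp hi) j (List.mem_cons_self)
    obtain ⟨ha, hb, hcu⟩ := writecol_lift j
      (fun i => if i < rows - (((List.range rows).map (fun i => (lst.getD i []).getD j 0)).filter
          (fun x => x ≠ 0)).length then 0
        else (((List.range rows).map (fun i => (lst.getD i []).getD j 0)).filter
          (fun x => x ≠ 0)).getD (i - (rows - (((List.range rows).map
            (fun i => (lst.getD i []).getD j 0)).filter (fun x => x ≠ 0)).length)) 0)
      (List.range rows) lst hin
    set lst1 := (List.range rows).foldl
      (fun l2 i => pvSetAt l2 i j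
        (if i < rows - (((List.range rows).map (fun i => (lst.getD i []).getD j 0)).filter
            (fun x => x ≠ 0)).length then 0
         else (((List.range rows).map (fun i => (lst.getD i []).getD j 0)).filter
            (fun x => x ≠ 0)).getD (i - (rows - (((List.range rows).map
              (fun i => (lst.getD i []).getD j 0)).filter (fun x => x ≠ 0)).length)) 0)) lst
      with hlst1
    -- the written column is exactly cmp1 of the old column
    have hflen : ((colOf j lst).filter (fun x => x ≠ 0)).length ≤ rows := by
      have h1 := List.length_filter_le (fun x => decide (x ≠ 0)) (colOf j lst)
      have h2 : (colOf j lst).length = rows := by rw [colOf, List.length_map, hlen]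
      omega
    have hbcol : colOf j lst1 = cmp1 (colOf j lst) := by
      rw [hb]
      simp only [hc]
      rw [foldl_set_range _ rows (colOf j lst) (by rw [colOf, List.length_map, hlen])]
      rw [List.drop_of_length_le (by rw [colOf, List.length_map, hlen]), List.append_nil]
      rw [map_range_pad (rows - ((colOf j lst).filter (fun x => x ≠ 0)).length)
        ((colOf j lst).filter (fun x => x ≠ 0)) rows (by omega)]
      rw [cmp1, colOf, List.length_map, hlen]
    have hlen1 : lst1.length = rows := by
      rw [length_eq_of_rowlens ha, hlen]
    have hw1 : ∀ i, i < rows → ∀ j'' ∈ js, j'' < (lst1.map List.length).getD i 0 := by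
      intro i hi j'' hj''
      rw [ha]
      exact hw i hi j'' (List.mem_cons_of_mem _ hj'')
    obtain ⟨ha2, hb2⟩ := ih lst1 (List.Nodup.of_cons hnd) hlen1 hw1
    constructor
    · rw [ha2, ha]
    · intro j'
      rw [hb2 j']
      by_cases hmem : j' ∈ js
      · rw [if_pos hmem, if_pos (List.mem_cons_of_mem _ hmem)]
        by_cases hjj : j' = j
        · exact absurd (hjj ▸ hmem) (List.nodup_cons.mp hnd).1
        · rw [hcu j' hjj]
      · rw [if_neg hmem]
        by_cases hjj : j' = j
        · subst hjj
          rw [if_pos (List.mem_cons_self), hbcol]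
        · rw [if_neg (by simp [hjj, hmem]), hcu j' hjj]

theorem grids_ext (l1 l2 : List (List Int)) (hlen : l1.map List.length = l2.map List.length)
    (hcols : ∀ j, colOf j l1 = colOf j l2) : l1 = l2 := by
  apply List.ext_getElem (length_eq_of_rowlens hlen)
  intro i h1 h2
  apply List.ext_getElem
  · have e1 : l1[i].length = (l1.map List.length).getD i 0 := by
      rw [← rowlen_eq, List.getD_eq_getElem _ _ h1]
    have e2 : l2[i].length = (l2.map List.length).getD i 0 := by
      rw [← rowlen_eq, List.getD_eq_getElem _ _ h2]
    rw [e1, e2, hlen]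
  intro j hj1 hj2
  have h := congrArg (fun c => c.getD i 0) (hcols j)
  simp only at h
  rw [getD_colOf _ _ _ h1, getD_colOf _ _ _ h2,
    List.getD_eq_getElem _ _ h1, List.getD_eq_getElem _ _ h2,
    List.getD_eq_getElem _ _ hj1, List.getD_eq_getElem _ _ hj2] at h
  exact h

-- ===== VERDICT (by name: the statement is the Claim_ definition above) =====
theorem gravite_spec : Claim_equal_gravite := by
  intro lst _ hpre
  obtain ⟨hne, hrect⟩ := hpre
  unfold Spec_gravite
  have hpos : 1 ≤ lst.length := List.length_pos_of_ne_nil hne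
  set cols := (lst.headD []).length with hcols'
  have hrowlen : ∀ i, i < lst.length → cols ≤ (lst.getD i []).length := by
    intro i hi
    rw [List.getD_eq_getElem _ _ hi]
    exact hrect _ (List.getElem_mem hi)
  have hw : ∀ i, i < lst.length → ∀ j ∈ List.range cols, j < (lst.map List.length).getD i 0 := by
    intro i hi j hj
    rw [← rowlen_eq]
    have h1 := hrowlen i hi
    have h2 := List.mem_range.mp hj
    omega
  obtain ⟨hshA, hcolA⟩ := jloop_lift lst.length (List.range cols) lst List.nodup_range rfl hw
  obtain ⟨hshB, hcolB⟩ := jloopB_lift lst.length (List.range cols) lst List.nodup_range rfl hw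
  have hgA : gravite lst = (List.range cols).foldl (fun l j => pvILoopA lst.length j l) lst := rfl
  have hgB : gravite_alt lst = (List.range cols).foldl (fun l j =>
      let nz := ((List.range lst.length).map
        (fun i => (l.getD i []).getD j 0)).filter (fun x => x ≠ 0)
      let z := lst.length - nz.length
      (List.range lst.length).foldl
        (fun l2 i => pvSetAt l2 i j (if i < z then 0 else nz.getD (i - z) 0)) l) lst := rfl
  rw [hgA, hgB]
  apply grids_ext
  · rw [hshA, hshB]
  · intro j
    rw [hcolA j, hcolB j]
    by_cases hj : j ∈ List.range cols
    · rw [if_pos hj, if_pos hj]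
      exact A1_spec lst.length (colOf j lst) (by simp [colOf]) hpos
    · rw [if_neg hj, if_neg hj]
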